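-- pv_equiv track=rewrite | github.com/webcomponents/webcomponents.org | src/util.py | generate_prefixes
-- ===== SOURCE A (Python) =====
-- def generate_prefixes(string):
--   # split "AndyMutton" into ["And", "Andy", "AndyM", "AndyMu", "AndyMut" ...]
--   prefixes = []
--   # minimum prefix length is 3, so only words at least 4 chars long are valid here
--   if len(string) < 4:
--     return []
--
--   for char in string:
--     if len(prefixes) > 0:
--       prefixes.append(prefixes[-1] + char)
--     else:
--       prefixes.append(char)
--   # skip the first two (too small) and the last (indexed elsewhere)
--   return prefixes[2:-1]
-- ===== SOURCE B (Python) =====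
-- def generate_prefixes(string):
--   # each prefix is an independent slice of the source; no running accumulator,
--   # and the empty range makes strings shorter than 4 chars yield [] naturally
--   return [string[:i] for i in range(3, len(string))]
-- ===== Notes on version B (the rewrite author's own statement) =====
-- stated objective: simpler
-- what changed: Replaced the character-by-character accumulation of every prefix (then discarding the first two and last via prefixes[2:-1]) with direct independent slices string[:i] for i in range(3, len(string)); the explicit len<4 guard disappears because the range is then empty.
import Mathlib
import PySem

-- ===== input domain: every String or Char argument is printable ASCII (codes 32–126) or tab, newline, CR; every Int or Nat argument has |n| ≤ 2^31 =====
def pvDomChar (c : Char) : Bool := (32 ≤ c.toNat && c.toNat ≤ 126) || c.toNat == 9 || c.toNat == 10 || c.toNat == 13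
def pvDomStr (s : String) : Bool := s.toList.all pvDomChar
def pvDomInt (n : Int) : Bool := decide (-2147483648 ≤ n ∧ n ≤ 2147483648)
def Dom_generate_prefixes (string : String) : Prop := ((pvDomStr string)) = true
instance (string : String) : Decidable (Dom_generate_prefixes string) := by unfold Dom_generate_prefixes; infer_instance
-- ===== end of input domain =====

-- B replaces A's running accumulation of every prefix (then prefixes[2:-1]) with
-- independent slices string[:i] over range(3, len(string)); objective: simpler.

-- ===== PORT A =====
-- the loop body: append prefixes[-1] + char, or just the char when empty
def pvStepA (prefixes : List String) (char : Char) : List String :=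
  if prefixes.length > 0 then
    prefixes ++ [((PySem.List.pyGet? prefixes (-1)).getD "") ++ char.toString]
  else
    prefixes ++ [char.toString]

def generate_prefixes (string : String) : List String :=
  if PySem.Str.len string < 4 then []
  else
    let prefixes := string.toList.foldl pvStepA []
    PySem.List.slice prefixes (some 2) (some (-1))

-- ===== PORT B =====
def generate_prefixes_alt (string : String) : List String :=
  (PySem.List.pyRange 3 (PySem.Str.len string) 1).map
    (fun i => PySem.Str.slice string none (some i))

-- ===== PRECONDITION & SPEC =====
def Spec_generate_prefixes (string : String) (out : List String) : Prop := out = generate_prefixes_alt string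
instance (string : String) (out : List String) : Decidable (Spec_generate_prefixes string out) := by unfold Spec_generate_prefixes; infer_instance

-- ===== CLAIM (what is proved, stated in full; the proofs are below) =====
def Claim_equal_generate_prefixes : Prop := ∀ (string : String), Dom_generate_prefixes string → Spec_generate_prefixes string (generate_prefixes string)

-- ===== LEMMAS AND PROOFS =====

-- A's loop from a nonempty accumulator ending in `p` appends, for each i,
-- the string `p ++ cs.take (i+1)`.
theorem pvFoldA (cs : List Char) (B : List String) (p : List Char) :
    cs.foldl pvStepA (B ++ [String.ofList p]) =
      (B ++ [String.ofList p]) ++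
        (List.range cs.length).map (fun i => String.ofList (p ++ cs.take (i+1))) := by
  induction cs generalizing B p with
  | nil => simp
  | cons c cs ih =>
    have h1 : pvStepA (B ++ [String.ofList p]) c
        = (B ++ [String.ofList p]) ++ [String.ofList (p ++ [c])] := by
      simp [pvStepA]
      apply String.ext; simp
    rw [List.foldl_cons, h1]
    have := ih ((B ++ [String.ofList p])) (p ++ [c])
    rw [List.append_assoc] at this ⊢
    rw [this]
    simp [List.range_succ_eq_map, List.map_map, Function.comp]

-- A's full prefixes list is the list of takes of lengths 1..n.
theorem pvFoldA_nil (cs : List Char) :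
    cs.foldl pvStepA [] =
      (List.range cs.length).map (fun i => String.ofList (cs.take (i+1))) := by
  cases cs with
  | nil => simp
  | cons c cs =>
    have h0 : pvStepA [] c = [] ++ [String.ofList [c]] := by
      simp [pvStepA]; apply String.ext; simp
    rw [List.foldl_cons, h0, pvFoldA]
    simp [List.range_succ_eq_map, List.map_map, Function.comp]

-- xs[2:-1] for a list of length ≥ 4
theorem pvSliceTwoNegOne (xs : List String) (h : 4 ≤ xs.length) :
    PySem.List.slice xs (some 2) (some (-1)) = (xs.drop 2).take (xs.length - 3) := by
  simp [PySem.List.slice]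
  have h2 : min 2 xs.length = 2 := by omega
  simp [h2, Nat.sub_sub]

-- string[:k] for a natural k
theorem pvStrSliceTo (s : String) (k : Nat) :
    PySem.Str.slice s none (some (k:Int)) = String.ofList (s.toList.take k) := by
  apply String.ext
  simp [PySem.List.slice_to]

-- ===== VERDICT (by name: the statement is the Claim_ definition above) =====
theorem generate_prefixes_spec : Claim_equal_generate_prefixes := by
  intro string _
  show generate_prefixes string = generate_prefixes_alt string
  unfold generate_prefixes generate_prefixes_alt
  by_cases h : PySem.Str.len string < 4
  · rw [if_pos h]
    rw [PySem.List.pyRange_one_eq_nil (by simp [PySem.Str.len] at h ⊢; omega)]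
    simp
  · rw [if_neg h]
    have hlen : PySem.Str.len string = (string.toList.length : Int) := by
      simp [PySem.Str.len]
    have hn : 4 ≤ string.toList.length := by rw [hlen] at h; omega
    rw [pvFoldA_nil, pvSliceTwoNegOne _ (by simpa using hn), hlen,
        PySem.List.pyRange_one]
    apply List.ext_getElem
    · simp; omega
    · intro i h1 h2
      simp only [List.getElem_take, List.getElem_drop, List.getElem_map,
        List.getElem_range]
      have : (3:Int) + (i:Int) = ((3 + i : Nat) : Int) := by push_cast; ring
      rw [this, pvStrSliceTo]
      congr 2
      omega
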